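-- pv_equiv track=rewrite | github.com/Ljfanny/Parallel-Testing-Research | analy.py | analysis_machs_list
-- ===== SOURCE A (Python) =====
-- def analysis_machs_list(machs: list):
--     config_idx_dict = {}
--     idx_config_dict = {}
--     idx_num_dict = {}
--     idx = 0
--     for m in machs:
--         if m in config_idx_dict.keys():
--             idx_num_dict[config_idx_dict[m]] += 1
--             continue
--         config_idx_dict[m] = idx
--         idx_config_dict[idx] = m
--         idx_num_dict[idx] = 1
--         idx += 1
--     return idx, config_idx_dict, idx_config_dict, idx_num_dict
-- ===== SOURCE B (Python) =====
-- def analysis_machs_list(machs: list):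
--     # two-stage: dedup + count first, then one enumerate pass builds all three dicts
--     keys = list(dict.fromkeys(machs))
--     counts = {}
--     for m in machs:
--         counts[m] = counts.get(m, 0) + 1
--     config_idx_dict = {}
--     idx_config_dict = {}
--     idx_num_dict = {}
--     for idx, m in enumerate(keys):
--         config_idx_dict[m] = idx
--         idx_config_dict[idx] = m
--         idx_num_dict[idx] = counts[m]
--     return len(config_idx_dict), config_idx_dict, idx_config_dict, idx_num_dict
-- ===== Notes on version B (the rewrite author's own statement) =====
-- stated objective: idiomatic
-- what changed: Replaces A's single running-increment pass (membership test plus counter bump per element) by a two-stage shape: first dedup via dict.fromkeys and a counting pass, then one enumerate loop over the distinct configs fills all three dicts.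
import Mathlib
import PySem

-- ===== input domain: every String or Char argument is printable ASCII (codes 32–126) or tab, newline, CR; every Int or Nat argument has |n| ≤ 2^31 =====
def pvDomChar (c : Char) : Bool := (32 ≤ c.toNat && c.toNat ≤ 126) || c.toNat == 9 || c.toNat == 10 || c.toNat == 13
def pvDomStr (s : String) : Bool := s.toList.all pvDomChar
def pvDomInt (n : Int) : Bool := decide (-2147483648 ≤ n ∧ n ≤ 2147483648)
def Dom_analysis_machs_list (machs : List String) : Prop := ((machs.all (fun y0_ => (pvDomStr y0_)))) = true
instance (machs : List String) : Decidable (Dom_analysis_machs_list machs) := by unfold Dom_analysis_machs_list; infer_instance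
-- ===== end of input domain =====

-- B restructures A's single running-count pass into a dedup + count stage followed by one enumerate pass over the distinct configs (idiomatic decomposition; same cost).

-- ===== PORT A =====
-- A's loop body; the dict accesses idx_num_dict[config_idx_dict[m]] += 1 happen under the membership
-- check, so both keys are present and getD/modify are exact there
def pvStepA (s : PySem.Dict String Int × PySem.Dict Int String × PySem.Dict Int Int × Int) (m : String) :
    PySem.Dict String Int × PySem.Dict Int String × PySem.Dict Int Int × Int :=
  if s.1.contains m then
    (s.1, s.2.1, s.2.2.1.modify (s.1.getD m 0) 0 (· + 1), s.2.2.2)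
  else
    (s.1.insert m s.2.2.2, s.2.1.insert s.2.2.2 m, s.2.2.1.insert s.2.2.2 1, s.2.2.2 + 1)


def analysis_machs_list (machs : List String) : Int × (List (String × Int)) × (List (Int × String)) × (List (Int × Int)) :=
  let s := machs.foldl pvStepA (PySem.Dict.empty, PySem.Dict.empty, PySem.Dict.empty, 0)
  (s.2.2.2, s.1.items, s.2.1.items, s.2.2.1.items)

-- ===== PORT B =====
def analysis_machs_list_alt (machs : List String) : Int × (List (String × Int)) × (List (Int × String)) × (List (Int × Int)) :=
  let keys := PySem.List.dedup machs
  let counts := machs.foldl (fun (d : PySem.Dict String Int) m => d.insert m (d.getD m 0 + 1)) PySem.Dict.empty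
  let t := (PySem.List.enumerate keys 0).foldl
    (fun (t : PySem.Dict String Int × PySem.Dict Int String × PySem.Dict Int Int) p =>
      (t.1.insert p.2 p.1, t.2.1.insert p.1 p.2, t.2.2.insert p.1 (counts.getD p.2 0)))
    (PySem.Dict.empty, PySem.Dict.empty, PySem.Dict.empty)
  ((t.1.size : Int), t.1.items, t.2.1.items, t.2.2.items)

-- ===== PRECONDITION & SPEC =====
def Spec_analysis_machs_list (machs : List String) (out : Int × (List (String × Int)) × (List (Int × String)) × (List (Int × Int))) : Prop := out = analysis_machs_list_alt machs
instance (machs : List String) (out : Int × (List (String × Int)) × (List (Int × String)) × (List (Int × Int))) : Decidable (Spec_analysis_machs_list machs out) := by unfold Spec_analysis_machs_list; infer_instance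

-- ===== CLAIM (what is proved, stated in full; the proofs are below) =====
def Claim_equal_analysis_machs_list : Prop := ∀ (machs : List String), Dom_analysis_machs_list machs → Spec_analysis_machs_list machs (analysis_machs_list machs)

-- ===== LEMMAS AND PROOFS =====

def pvE (xs : List String) : List (Int × String) := PySem.List.enumerate (PySem.List.dedup xs) 0

def pvS (xs : List String) : PySem.Dict String Int × PySem.Dict Int String × PySem.Dict Int Int × Int :=
  (PySem.Dict.mk ((pvE xs).map (fun p => (p.2, p.1))),
   PySem.Dict.mk (pvE xs),
   PySem.Dict.mk ((pvE xs).map (fun p => (p.1, (xs.count p.2 : Int)))),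
   ((PySem.List.dedup xs).length : Int))

theorem pvE_mem (xs : List String) (p : Int × String) :
    p ∈ pvE xs ↔ ∃ (k : Nat) (h : k < (PySem.List.dedup xs).length), p = ((k : Int), (PySem.List.dedup xs)[k]) := by
  unfold pvE
  rw [PySem.List.mem_enumerate_iff]
  simp

theorem pv_nodup_fst (xs : List String) : ((pvE xs).map (·.1)).Nodup := by
  have h := PySem.List.pairwise_lt_enumerate (PySem.List.dedup xs) 0
  have : ((pvE xs).map (·.1)).Pairwise (· < ·) := by
    rw [List.pairwise_map]; exact h
  exact this.imp (fun h => ne_of_lt h)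

theorem pv_keys_cfg (xs : List String) : (pvS xs).1.keys = PySem.List.dedup xs := by
  show ((pvE xs).map (fun p => (p.2, p.1))).map (·.1) = _
  rw [List.map_map]
  exact PySem.List.map_snd_enumerate _ 0

theorem pv_contains_cfg (xs : List String) (m : String) :
    (pvS xs).1.contains m = decide (m ∈ xs) := by
  rw [PySem.Dict.contains_eq_decide_mem_keys, pv_keys_cfg]
  simp

theorem pv_dedup_append_mem (xs : List String) (m : String) (h : m ∈ xs) :
    PySem.List.dedup (xs ++ [m]) = PySem.List.dedup xs := by
  simp only [PySem.List.dedup_eq_ofList, PySem.Set.ofList_append_singleton]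
  exact PySem.Set.add_of_mem (by rw [PySem.Set.mem_ofList]; exact h)

theorem pv_dedup_append_not_mem (xs : List String) (m : String) (h : ¬ m ∈ xs) :
    PySem.List.dedup (xs ++ [m]) = PySem.List.dedup xs ++ [m] := by
  simp only [PySem.List.dedup_eq_ofList, PySem.Set.ofList_append_singleton]
  exact PySem.Set.add_of_not_mem (by rw [PySem.Set.mem_ofList]; exact h)

theorem pv_step_mem (xs : List String) (m : String) (hm : m ∈ xs) :
    ((pvS xs).2.2.1.modify ((pvS xs).1.getD m 0) 0 (· + 1)) =
      (pvS (xs ++ [m])).2.2.1 := by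
  -- the index of m among the distinct configs
  have hmD : m ∈ PySem.List.dedup xs := (PySem.List.mem_dedup xs m).2 hm
  obtain ⟨k, hk, hmk⟩ := List.mem_iff_getElem.1 hmD
  have hkE : ((k : Int), m) ∈ pvE xs := by
    rw [pvE_mem]; exact ⟨k, hk, by rw [hmk]⟩
  -- getD on cfg gives k
  have hcfg : (pvS xs).1.getD m 0 = (k : Int) := by
    apply PySem.Dict.getD_of_mem_items (d := (pvS xs).1) (k := m) (v := (k : Int))
    · show (m, (k : Int)) ∈ (pvE xs).map (fun p => (p.2, p.1))
      exact List.mem_map.2 ⟨((k : Int), m), hkE, rfl⟩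
    · rw [pv_keys_cfg]; exact PySem.List.nodup_dedup xs
  rw [hcfg]
  -- getD on numD at k gives the count of m
  have hcnt : (pvS xs).2.2.1.getD (k : Int) 0 = (xs.count m : Int) := by
    apply PySem.Dict.getD_of_mem_items (d := (pvS xs).2.2.1)
    · show ((k : Int), (xs.count m : Int)) ∈ (pvE xs).map (fun p => (p.1, (xs.count p.2 : Int)))
      exact List.mem_map.2 ⟨((k : Int), m), hkE, rfl⟩
    · show (((pvE xs).map (fun p => (p.1, (xs.count p.2 : Int)))).map (·.1)).Nodup
      rw [List.map_map]
      exact pv_nodup_fst xs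
  have hcont : (pvS xs).2.2.1.contains (k : Int) = true := by
    rw [PySem.Dict.contains_eq_decide_mem_keys]
    simp only [decide_eq_true_eq]
    show (k : Int) ∈ ((pvE xs).map (fun p => (p.1, (xs.count p.2 : Int)))).map (·.1)
    rw [List.map_map]
    exact List.mem_map.2 ⟨((k : Int), m), hkE, rfl⟩
  have hmod : ∀ (d : PySem.Dict Int Int) (j : Int) (f : Int → Int), d.modify j 0 f = d.insert j (f (d.getD j 0)) := fun _ _ _ => rfl
  rw [hmod]
  apply PySem.Dict.ext
  rw [PySem.Dict.items_insert_of_contains _ _ hcont]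
  show ((pvE xs).map (fun p => (p.1, (xs.count p.2 : Int)))).map _ = (pvE (xs ++ [m])).map (fun p => (p.1, ((xs ++ [m]).count p.2 : Int)))
  have hE : pvE (xs ++ [m]) = pvE xs := by unfold pvE; rw [pv_dedup_append_mem xs m hm]
  rw [hE, List.map_map]
  apply List.map_congr_left
  intro p hp
  obtain ⟨i, hi, hpi⟩ := (pvE_mem xs p).1 hp
  subst hpi
  simp only [Function.comp]
  by_cases hik : i = k
  · subst hik
    simp only [hmk, hcnt, beq_self_eq_true, if_pos]
    have : (xs ++ [m]).count m = xs.count m + 1 := by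
      rw [List.count_append]; simp
    rw [this]; push_cast; simp
  · have hne : ((i : Int) == (k : Int)) = false := by
      simp only [beq_eq_false_iff_ne, ne_eq, Int.natCast_inj]
      exact hik
    simp only [hne, if_neg, Bool.false_eq_true, not_false_iff]
    have hne2 : (PySem.List.dedup xs)[i] ≠ m := by
      rw [← hmk]
      intro hc
      exact hik ((PySem.List.nodup_dedup xs).getElem_inj_iff.1 hc)
    have hcc : List.count (PySem.List.dedup xs)[i] (xs ++ [m]) = List.count (PySem.List.dedup xs)[i] xs := by
      simp only [List.count_append, List.count_singleton]
      have : ¬ m = (PySem.List.dedup xs)[i] := fun hc => hne2 hc.symm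
      simp only [PySem.List.dedup_eq_ofList] at this
      simp [this]
    rw [hcc]

theorem pvE_append_not_mem (xs : List String) (m : String) (h : ¬ m ∈ xs) :
    pvE (xs ++ [m]) = pvE xs ++ [(((PySem.List.dedup xs).length : Int), m)] := by
  unfold pvE
  rw [pv_dedup_append_not_mem xs m h, PySem.List.enumerate_append]
  simp [PySem.List.enumerate]

theorem pv_not_mem_fst (xs : List String) :
    ∀ p ∈ pvE xs, p.1 ≠ ((PySem.List.dedup xs).length : Int) := by
  intro p hp
  obtain ⟨i, hi, hpi⟩ := (pvE_mem xs p).1 hp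
  subst hpi
  simp only [ne_eq, Int.natCast_inj]
  omega

theorem pv_step_not_mem (xs : List String) (m : String) (hm : ¬ m ∈ xs) :
    ((pvS xs).1.insert m (pvS xs).2.2.2,
     (pvS xs).2.1.insert (pvS xs).2.2.2 m,
     (pvS xs).2.2.1.insert (pvS xs).2.2.2 1,
     (pvS xs).2.2.2 + 1) = pvS (xs ++ [m]) := by
  have hmD : ¬ m ∈ PySem.List.dedup xs := fun hc => hm ((PySem.List.mem_dedup xs m).1 hc)
  have hE := pvE_append_not_mem xs m hm
  have hL : ((PySem.List.dedup (xs ++ [m])).length : Int) = ((PySem.List.dedup xs).length : Int) + 1 := by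
    rw [pv_dedup_append_not_mem xs m hm, List.length_append, List.length_singleton]
    push_cast
    ring
  have hidx : (pvS xs).2.2.2 = ((PySem.List.dedup xs).length : Int) := rfl
  refine Prod.ext ?_ (Prod.ext ?_ (Prod.ext ?_ ?_)) <;> dsimp only
  · -- cfg
    apply PySem.Dict.ext
    have hc : (pvS xs).1.contains m = false := by
      rw [pv_contains_cfg]; simp [hm]
    rw [hidx, PySem.Dict.items_insert_of_not_contains _ _ hc]
    show ((pvE xs).map _) ++ _ = (pvE (xs ++ [m])).map (fun p => (p.2, p.1))
    rw [hE]
    simp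
  · -- idx -> config
    apply PySem.Dict.ext
    have hc : (pvS xs).2.1.contains ((PySem.List.dedup xs).length : Int) = false := by
      rw [PySem.Dict.contains_eq_decide_mem_keys]
      simp only [decide_eq_false_iff_not]
      show ¬ _ ∈ (pvE xs).map (·.1)
      rw [List.mem_map]
      rintro ⟨p, hp, hpe⟩
      exact pv_not_mem_fst xs p hp hpe
    rw [hidx, PySem.Dict.items_insert_of_not_contains _ _ hc]
    show pvE xs ++ _ = pvE (xs ++ [m])
    rw [hE]
  · -- idx -> num
    apply PySem.Dict.ext
    have hc : (pvS xs).2.2.1.contains ((PySem.List.dedup xs).length : Int) = false := by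
      rw [PySem.Dict.contains_eq_decide_mem_keys]
      simp only [decide_eq_false_iff_not]
      show ¬ _ ∈ ((pvE xs).map (fun p => (p.1, (xs.count p.2 : Int)))).map (·.1)
      rw [List.map_map, List.mem_map]
      rintro ⟨p, hp, hpe⟩
      exact pv_not_mem_fst xs p hp (by simpa using hpe)
    rw [hidx, PySem.Dict.items_insert_of_not_contains _ _ hc]
    show ((pvE xs).map (fun p => (p.1, (xs.count p.2 : Int)))) ++ _ = (pvE (xs ++ [m])).map (fun p => (p.1, ((xs ++ [m]).count p.2 : Int)))
    rw [hE, List.map_append]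
    congr 1
    · apply List.map_congr_left
      intro p hp
      obtain ⟨i, hi, hpi⟩ := (pvE_mem xs p).1 hp
      subst hpi
      have hne2 : ¬ m = (PySem.List.dedup xs)[i] := fun hc => hmD (hc ▸ List.getElem_mem hi)
      simp only [PySem.List.dedup_eq_ofList] at hne2
      simp [List.count_append, hne2]
    · have h0 : List.count m xs = 0 := List.count_eq_zero.2 hm
      simp [List.count_append, h0]
  · -- idx counter
    rw [hidx, show (pvS (xs ++ [m])).2.2.2 = ((PySem.List.dedup (xs ++ [m])).length : Int) from rfl, hL]

theorem pvStepA_eq (xs : List String) (m : String) : pvStepA (pvS xs) m = pvS (xs ++ [m]) := by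
  unfold pvStepA
  rw [pv_contains_cfg]
  by_cases hm : m ∈ xs
  · simp only [hm, decide_true, if_pos]
    have hE : pvE (xs ++ [m]) = pvE xs := by
      unfold pvE; rw [pv_dedup_append_mem xs m hm]
    have hS1 : (pvS (xs ++ [m])).1 = (pvS xs).1 := by
      unfold pvS; dsimp only; rw [hE]
    have hS2 : (pvS (xs ++ [m])).2.1 = (pvS xs).2.1 := by
      unfold pvS; dsimp only; rw [hE]
    have hS4 : (pvS (xs ++ [m])).2.2.2 = (pvS xs).2.2.2 := by
      unfold pvS; dsimp only; rw [pv_dedup_append_mem xs m hm]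
    refine Prod.ext ?_ (Prod.ext ?_ (Prod.ext ?_ ?_)) <;> dsimp only
    · exact hS1.symm
    · exact hS2.symm
    · exact pv_step_mem xs m hm
    · exact hS4.symm
  · simp only [hm, decide_false, Bool.false_eq_true, if_neg, not_false_iff]
    exact pv_step_not_mem xs m hm

theorem pvFoldA_eq (l xs : List String) : l.foldl pvStepA (pvS xs) = pvS (xs ++ l) := by
  induction l generalizing xs with
  | nil => simp
  | cons x l ih =>
      rw [List.foldl_cons, pvStepA_eq, ih]
      simp

theorem pv_foldl_prod3 {α β γ δ : Type} (f : α → δ → α) (g : β → δ → β) (h : γ → δ → γ)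
    (l : List δ) (a : α) (b : β) (c : γ) :
    l.foldl (fun t p => (f t.1 p, g t.2.1 p, h t.2.2 p)) (a, b, c) = (l.foldl f a, l.foldl g b, l.foldl h c) := by
  induction l generalizing a b c with
  | nil => rfl
  | cons x l ih => simp [List.foldl_cons, ih]


theorem pvA_eq (machs : List String) :
    analysis_machs_list machs =
      (((PySem.List.dedup machs).length : Int),
       (pvE machs).map (fun p => (p.2, p.1)),
       pvE machs,
       (pvE machs).map (fun p => (p.1, (machs.count p.2 : Int)))) := by
  unfold analysis_machs_list
  have h0 : ((PySem.Dict.empty, PySem.Dict.empty, PySem.Dict.empty, (0 : Int)) :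
      PySem.Dict String Int × PySem.Dict Int String × PySem.Dict Int Int × Int) = pvS [] := rfl
  rw [h0, pvFoldA_eq machs []]
  rfl

theorem pvB_eq (machs : List String) :
    analysis_machs_list_alt machs =
      (((PySem.List.dedup machs).length : Int),
       (pvE machs).map (fun p => (p.2, p.1)),
       pvE machs,
       (pvE machs).map (fun p => (p.1, (machs.count p.2 : Int)))) := by
  simp only [analysis_machs_list_alt]
  rw [PySem.Dict.foldl_insert_getD_add_one_eq_counter machs]
  rw [pv_foldl_prod3 (fun (a : PySem.Dict String Int) (p : Int × String) => a.insert p.2 p.1)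
      (fun (b : PySem.Dict Int String) (p : Int × String) => b.insert p.1 p.2)
      (fun (c : PySem.Dict Int Int) (p : Int × String) => c.insert p.1 ((PySem.Dict.counter machs).getD p.2 0))
      (PySem.List.enumerate (PySem.List.dedup machs) 0) PySem.Dict.empty PySem.Dict.empty PySem.Dict.empty]
  dsimp only
  have h1 : ((pvE machs).foldl (fun (d : PySem.Dict String Int) p => d.insert p.2 p.1) PySem.Dict.empty).items
      = (pvE machs).map (fun p => (p.2, p.1)) := by
    rw [PySem.Dict.items_foldl_insert_fresh (pvE machs) (fun p => p.2) (fun p => p.1) PySem.Dict.empty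
      (fun a _ => PySem.Dict.contains_empty _) (by rw [show ((pvE machs).map fun p => p.2) = (pvE machs).map (·.2) from rfl, pvE, PySem.List.map_snd_enumerate]; exact PySem.List.nodup_dedup machs)]
    rw [show (PySem.Dict.empty : PySem.Dict String Int).items = [] from rfl, List.nil_append]
  have h2 : ((pvE machs).foldl (fun (d : PySem.Dict Int String) p => d.insert p.1 p.2) PySem.Dict.empty).items
      = pvE machs := by
    rw [PySem.Dict.items_foldl_insert_fresh (pvE machs) (fun p => p.1) (fun p => p.2) PySem.Dict.empty
      (fun a _ => PySem.Dict.contains_empty _) (pv_nodup_fst machs)]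
    rw [show (PySem.Dict.empty : PySem.Dict Int String).items = [] from rfl, List.nil_append]
    simp
  have h3 : ((pvE machs).foldl (fun (d : PySem.Dict Int Int) p => d.insert p.1 ((PySem.Dict.counter machs).getD p.2 0)) PySem.Dict.empty).items
      = (pvE machs).map (fun p => (p.1, (machs.count p.2 : Int))) := by
    rw [PySem.Dict.items_foldl_insert_fresh (pvE machs) (fun p => p.1) (fun p => (PySem.Dict.counter machs).getD p.2 0) PySem.Dict.empty
      (fun a _ => PySem.Dict.contains_empty _) (pv_nodup_fst machs)]
    rw [show (PySem.Dict.empty : PySem.Dict Int Int).items = [] from rfl, List.nil_append]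
    apply List.map_congr_left
    intro p hp
    rw [PySem.Dict.getD_counter]
  have hsize : (((pvE machs).foldl (fun (d : PySem.Dict String Int) p => d.insert p.2 p.1) PySem.Dict.empty).size : Int)
      = ((PySem.List.dedup machs).length : Int) := by
    have : ((pvE machs).foldl (fun (d : PySem.Dict String Int) p => d.insert p.2 p.1) PySem.Dict.empty).size
        = ((pvE machs).map (fun p => (p.2, p.1))).length := by
      show _root_.List.length _ = _
      rw [h1]
    rw [this, List.length_map, pvE, PySem.List.length_enumerate]
  refine Prod.ext ?_ (Prod.ext ?_ (Prod.ext ?_ ?_)) <;> dsimp only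
  · exact hsize
  · exact h1
  · exact h2
  · exact h3

-- ===== VERDICT (by name: the statement is the Claim_ definition above) =====
theorem analysis_machs_list_spec : Claim_equal_analysis_machs_list := by
  intro machs _
  unfold Spec_analysis_machs_list
  rw [pvA_eq, pvB_eq]
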